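-- pv_equiv track=rewrite | github.com/rajeshkumarkondapalli/codebases | test123.py | format_freemarker_code
-- ===== SOURCE A (Python) =====
-- def format_freemarker_code(freemarker_code):
--     """Formats the generated FreeMarker code."""
--     lines = freemarker_code.splitlines()
--     formatted_lines = []
--     current_indent = 0
--
--     for line in lines:
--         line = line.strip()
--         if not line:
--             formatted_lines.append("")
--             continue
--
--         if line.startswith("</#if>") or line.startswith("</#list>") or line.startswith("</#while>") or line.startswith("<#case>") or line.startswith("<#default>"):
--           current_indent -=1
--
--         formatted_line = "  " * current_indent + line
--         formatted_lines.append(formatted_line)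
--
--         if line.startswith("<#if ") or line.startswith("<#list ") or line.startswith("<#while ") or line.startswith("<#switch "):
--           current_indent += 1
--
--     return "\n".join(formatted_lines)
-- ===== SOURCE B (Python) =====
-- def format_freemarker_code(freemarker_code):
--     """Formats the generated FreeMarker code (deltas -> prefix sums -> render)."""
--     stripped = [ln.strip() for ln in freemarker_code.splitlines()]
--     opens = ("<#if ", "<#list ", "<#while ", "<#switch ")
--     closes = ("</#if>", "</#list>", "</#while>", "<#case>", "<#default>")
--     po = [0]
--     for ln in stripped:
--         po.append(po[-1] + (1 if ln.startswith(opens) else 0))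
--     pc = [0]
--     for ln in stripped:
--         pc.append(pc[-1] + (1 if ln.startswith(closes) else 0))
--     rendered = ["" if not ln else "  " * (o - c) + ln
--                 for o, c, ln in zip(po, pc[1:], stripped)]
--     return "\n".join(rendered)
-- ===== Notes on version B (the rewrite author's own statement) =====
-- stated objective: alternative
-- what changed: Replaces A's single stateful indent-accumulator loop with a deltas-then-prefix-sums-then-render decomposition: per-line open/close deltas, two prefix-sum lists, and a zip that renders each line from its computed indent.
import Mathlib
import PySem

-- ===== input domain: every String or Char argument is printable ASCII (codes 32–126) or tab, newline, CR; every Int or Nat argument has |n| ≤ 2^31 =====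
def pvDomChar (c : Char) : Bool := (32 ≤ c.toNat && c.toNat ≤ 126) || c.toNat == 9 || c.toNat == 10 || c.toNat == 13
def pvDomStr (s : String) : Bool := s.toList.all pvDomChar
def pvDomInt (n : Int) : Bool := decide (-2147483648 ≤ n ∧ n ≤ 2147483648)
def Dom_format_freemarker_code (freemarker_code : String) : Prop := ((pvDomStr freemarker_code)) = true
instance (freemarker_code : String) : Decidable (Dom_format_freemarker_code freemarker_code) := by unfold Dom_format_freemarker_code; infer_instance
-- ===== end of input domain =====

-- B replaces A's single stateful indent-accumulator loop by a deltas → prefix-sums → render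
-- decomposition (objective: alternative; same asymptotic cost).

-- shared primitive tests (in Python A they are inline or-chains, in B a tuple startswith —
-- CPython's tuple startswith is exactly this disjunction)
def pvIsClose (line : String) : Bool :=
  PySem.Str.startswith line "</#if>" || PySem.Str.startswith line "</#list>" ||
  PySem.Str.startswith line "</#while>" || PySem.Str.startswith line "<#case>" ||
  PySem.Str.startswith line "<#default>"

def pvIsOpen (line : String) : Bool :=
  PySem.Str.startswith line "<#if " || PySem.Str.startswith line "<#list " ||
  PySem.Str.startswith line "<#while " || PySem.Str.startswith line "<#switch "

-- '"  " * n + line' ported exactly (Python's str * int, "" for n ≤ 0)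
def pvIndented (n : Int) (line : String) : String :=
  String.ofList (PySem.List.pyRepeat "  ".toList n ++ line.toList)

-- ===== PORT A =====
def format_freemarker_code (freemarker_code : String) : String :=
  let lines := PySem.Str.splitlines freemarker_code
  let r := lines.foldl
    (fun (st : List String × Int) line =>
      let line := PySem.Str.strip line
      if line = "" then (st.1 ++ [""], st.2)
      else
        let current_indent := if pvIsClose line then st.2 - 1 else st.2
        let formatted_line := pvIndented current_indent line
        let fls := st.1 ++ [formatted_line]
        let current_indent := if pvIsOpen line then current_indent + 1 else current_indent
        (fls, current_indent))
    ([], 0)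
  PySem.Str.join "\n" r.1

-- ===== PORT B =====
def format_freemarker_code_alt (freemarker_code : String) : String :=
  let stripped := (PySem.Str.splitlines freemarker_code).map PySem.Str.strip
  let po := stripped.foldl
    (fun (acc : List Int) ln => acc ++ [acc.getLast! + (if pvIsOpen ln then 1 else 0)]) [0]
  let pc := stripped.foldl
    (fun (acc : List Int) ln => acc ++ [acc.getLast! + (if pvIsClose ln then 1 else 0)]) [0]
  -- zip(po, pc[1:], stripped) rendered; pc is nonempty so pc[1:] = drop 1 exactly
  let rendered := (po.zip ((pc.drop 1).zip stripped)).map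
    (fun x => if x.2.2 = "" then "" else pvIndented (x.1 - x.2.1) x.2.2)
  PySem.Str.join "\n" rendered

-- ===== PRECONDITION & SPEC =====
def Spec_format_freemarker_code (freemarker_code : String) (out : String) : Prop := out = format_freemarker_code_alt freemarker_code
instance (freemarker_code : String) (out : String) : Decidable (Spec_format_freemarker_code freemarker_code out) := by unfold Spec_format_freemarker_code; infer_instance

-- ===== CLAIM (what is proved, stated in full; the proofs are below) =====
def Claim_equal_format_freemarker_code : Prop := ∀ (freemarker_code : String), Dom_format_freemarker_code freemarker_code → Spec_format_freemarker_code freemarker_code (format_freemarker_code freemarker_code)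

-- ===== LEMMAS AND PROOFS =====

-- recursive characterisation of A's loop body over already-stripped lines
def pvRec : List String → Int → List String
  | [], _ => []
  | ln :: ls, d =>
    if ln = "" then "" :: pvRec ls d
    else
      let c : Int := if pvIsClose ln then 1 else 0
      let o : Int := if pvIsOpen ln then 1 else 0
      pvIndented (d - c) ln :: pvRec ls (d - c + o)

-- recursive characterisation of a prefix-sum scan
def pvScan (f : String → Int) : Int → List String → List Int
  | a, [] => [a]
  | a, ln :: ls => a :: pvScan f (a + f ln) ls

-- A's foldl equals pvRec over the stripped lines
theorem pvA_fold (ls : List String) (acc : List String) (d : Int) :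
    (ls.foldl
      (fun (st : List String × Int) line =>
        let line := PySem.Str.strip line
        if line = "" then (st.1 ++ [""], st.2)
        else
          let current_indent := if pvIsClose line then st.2 - 1 else st.2
          let formatted_line := pvIndented current_indent line
          let fls := st.1 ++ [formatted_line]
          let current_indent := if pvIsOpen line then current_indent + 1 else current_indent
          (fls, current_indent))
      (acc, d)).1 = acc ++ pvRec (ls.map PySem.Str.strip) d := by
  induction ls generalizing acc d with
  | nil => simp [pvRec]
  | cons l ls ih =>
    simp only [List.foldl_cons, List.map_cons]
    by_cases h : PySem.Str.strip l = ""
    · simp [h, pvRec, ih]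
    · simp only [h, pvRec]
      rw [ih]
      by_cases hc : pvIsClose (PySem.Str.strip l) <;>
        by_cases ho : pvIsOpen (PySem.Str.strip l) <;>
          simp [hc, ho, List.append_assoc]

def pvFO (ln : String) : Int := if pvIsOpen ln then 1 else 0
def pvFC (ln : String) : Int := if pvIsClose ln then 1 else 0

-- the suffix of a scan: pvScan f a ls = a :: pvRest f a ls
def pvRest (f : String → Int) : Int → List String → List Int
  | _, [] => []
  | a, ln :: ls => (a + f ln) :: pvRest f (a + f ln) ls

theorem pvScan_eq (f : String → Int) (a : Int) (ls : List String) :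
    pvScan f a ls = a :: pvRest f a ls := by
  induction ls generalizing a with
  | nil => simp [pvScan, pvRest]
  | cons l ls ih => simp [pvScan, pvRest, ih]

theorem pvGetLast_concat {α : Type} [Inhabited α] (l : List α) (a : α) :
    (l ++ [a]).getLast! = a := by
  cases l with
  | nil => rfl
  | cons x xs => simp [List.getLast!]

-- B's appending prefix-sum loop equals pvScan
theorem pvB_scan (f : String → Int) (ls : List String) (init : List Int) (a : Int) :
    ls.foldl (fun (acc : List Int) ln => acc ++ [acc.getLast! + f ln]) (init ++ [a])
      = init ++ pvScan f a ls := by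
  induction ls generalizing init a with
  | nil => simp [pvScan]
  | cons l ls ih =>
    simp only [List.foldl_cons, pvGetLast_concat, List.append_assoc, List.singleton_append]
    have := ih (init ++ [a]) (a + f l)
    simp only [List.append_assoc, List.singleton_append] at this
    rw [this, pvScan]

-- B's zipped render equals pvRec
theorem pvB_render (S : List String) (a c : Int) :
    ((pvScan pvFO a S).zip ((pvRest pvFC c S).zip S)).map
        (fun x => if x.2.2 = "" then "" else pvIndented (x.1 - x.2.1) x.2.2)
      = pvRec S (a - c) := by
  induction S generalizing a c with
  | nil => simp [pvScan, pvRest, pvRec]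
  | cons ln S ih =>
    simp only [pvScan, pvRest, List.zip_cons_cons, List.map_cons]
    rw [ih]
    by_cases h : ln = ""
    · subst h
      have hc : pvIsClose "" = false := by decide
      have ho : pvIsOpen "" = false := by decide
      simp [pvRec, pvFO, pvFC, hc, ho]
    · simp only [if_neg h, pvRec]
      rw [show (if pvIsClose ln then (1 : Int) else 0) = pvFC ln from rfl,
          show (if pvIsOpen ln then (1 : Int) else 0) = pvFO ln from rfl]
      congr 2
      · ring
      · ring

-- ===== VERDICT (by name: the statement is the Claim_ definition above) =====
theorem format_freemarker_code_spec : Claim_equal_format_freemarker_code := by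
  intro fc _
  unfold Spec_format_freemarker_code format_freemarker_code format_freemarker_code_alt
  simp only []
  rw [pvA_fold]
  rw [show (fun (acc : List Int) ln => acc ++ [acc.getLast! + (if pvIsOpen ln then (1 : Int) else 0)])
        = (fun (acc : List Int) ln => acc ++ [acc.getLast! + pvFO ln]) from rfl,
      show (fun (acc : List Int) ln => acc ++ [acc.getLast! + (if pvIsClose ln then (1 : Int) else 0)])
        = (fun (acc : List Int) ln => acc ++ [acc.getLast! + pvFC ln]) from rfl]
  have hpo := pvB_scan pvFO ((PySem.Str.splitlines fc).map PySem.Str.strip) [] 0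
  have hpc := pvB_scan pvFC ((PySem.Str.splitlines fc).map PySem.Str.strip) [] 0
  simp only [List.nil_append] at hpo hpc
  rw [hpo, hpc, pvScan_eq pvFC, List.drop_one, List.tail_cons, pvB_render]
  simp
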